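-- pv_equiv track=rewrite | github.com/nddevern/PkmnRngGen7 | src/DraftCommand.py | PrintPlayerListHeaderOrFooter
-- ===== SOURCE A (Python) =====
-- def PrintPlayerListHeaderOrFooter(playerInnerBoxWidth: int, currentTurnIndex: int, numPlayers: int) -> str:
--     retString = "+"
--     for i in range(numPlayers):
--         characterToFill = "-"
--         if i == currentTurnIndex:
--             characterToFill = "="
--         for j in range(playerInnerBoxWidth):
--             retString += characterToFill
--         retString += "+"
--     return retString + "\n"
-- ===== SOURCE B (Python) =====
-- def PrintPlayerListHeaderOrFooter(playerInnerBoxWidth: int, currentTurnIndex: int, numPlayers: int) -> str: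
--     if numPlayers <= 0:
--         return "+\n"
--     width = max(playerInnerBoxWidth, 0)
--     s = "+" + ("-" * width + "+") * numPlayers
--     if 0 <= currentTurnIndex < numPlayers:
--         start = 1 + currentTurnIndex * (width + 1)
--         s = s[:start] + "=" * width + s[start + width:]
--     return s + "\n"
-- ===== Notes on version B (the rewrite author's own statement) =====
-- stated objective: faster
-- what changed: Replaces the nested character-append loops by a closed-form build (string multiplication of the uniform segment) followed by a single slice-splice of the highlighted segment when currentTurnIndex is in range.
import Mathlib
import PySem

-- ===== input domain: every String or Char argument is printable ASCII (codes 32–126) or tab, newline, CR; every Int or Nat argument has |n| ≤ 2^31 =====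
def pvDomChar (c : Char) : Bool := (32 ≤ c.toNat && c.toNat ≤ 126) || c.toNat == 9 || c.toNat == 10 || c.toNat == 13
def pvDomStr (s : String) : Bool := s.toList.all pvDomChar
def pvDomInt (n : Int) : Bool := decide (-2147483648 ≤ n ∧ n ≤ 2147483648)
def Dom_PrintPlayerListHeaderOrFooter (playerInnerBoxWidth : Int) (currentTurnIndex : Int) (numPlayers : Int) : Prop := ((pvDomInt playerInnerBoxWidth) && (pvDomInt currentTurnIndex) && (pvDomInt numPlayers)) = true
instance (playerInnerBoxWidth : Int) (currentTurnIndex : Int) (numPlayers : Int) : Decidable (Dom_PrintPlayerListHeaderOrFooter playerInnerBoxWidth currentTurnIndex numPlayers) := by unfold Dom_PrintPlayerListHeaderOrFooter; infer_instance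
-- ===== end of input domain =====

-- B replaces A's nested character-append loops by a closed-form build of the uniform
-- border plus one slice-splice of the highlighted segment (objective: faster in Python,
-- where the repetitions and slices are single C-level operations).

-- ===== PORT A =====
def PrintPlayerListHeaderOrFooter (playerInnerBoxWidth : Int) (currentTurnIndex : Int) (numPlayers : Int) : String :=
  let retString : List Char :=
    (PySem.List.pyRange 0 numPlayers 1).foldl (fun retString i =>
      let characterToFill : Char := if i == currentTurnIndex then '=' else '-'
      let retString := (PySem.List.pyRange 0 playerInnerBoxWidth 1).foldl
        (fun retString _ => retString ++ [characterToFill]) retString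
      retString ++ ['+']) ['+']
  String.ofList (retString ++ ['\n'])

-- ===== PORT B =====
def PrintPlayerListHeaderOrFooter_alt (playerInnerBoxWidth : Int) (currentTurnIndex : Int) (numPlayers : Int) : String :=
  if numPlayers ≤ 0 then String.ofList ['+', '\n'] else
  let width : Int := max playerInnerBoxWidth 0
  let s : List Char := '+' :: PySem.List.pyRepeat (PySem.List.pyRepeat ['-'] width ++ ['+']) numPlayers
  let s : List Char :=
    if 0 ≤ currentTurnIndex ∧ currentTurnIndex < numPlayers then
      let start : Int := 1 + currentTurnIndex * (width + 1)
      PySem.List.slice s none (some start) ++ PySem.List.pyRepeat ['='] width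
        ++ PySem.List.slice s (some (start + width)) none
    else s
  String.ofList (s ++ ['\n'])

-- ===== PRECONDITION & SPEC =====
def Spec_PrintPlayerListHeaderOrFooter (playerInnerBoxWidth : Int) (currentTurnIndex : Int) (numPlayers : Int) (out : String) : Prop := out = PrintPlayerListHeaderOrFooter_alt playerInnerBoxWidth currentTurnIndex numPlayers
instance (playerInnerBoxWidth : Int) (currentTurnIndex : Int) (numPlayers : Int) (out : String) : Decidable (Spec_PrintPlayerListHeaderOrFooter playerInnerBoxWidth currentTurnIndex numPlayers out) := by unfold Spec_PrintPlayerListHeaderOrFooter; infer_instance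

-- ===== CLAIM (what is proved, stated in full; the proofs are below) =====
def Claim_equal_PrintPlayerListHeaderOrFooter : Prop := ∀ (playerInnerBoxWidth : Int) (currentTurnIndex : Int) (numPlayers : Int), Dom_PrintPlayerListHeaderOrFooter playerInnerBoxWidth currentTurnIndex numPlayers → Spec_PrintPlayerListHeaderOrFooter playerInnerBoxWidth currentTurnIndex numPlayers (PrintPlayerListHeaderOrFooter playerInnerBoxWidth currentTurnIndex numPlayers)

-- ===== LEMMAS AND PROOFS =====

-- A in closed form: '+' then, per player, the filled segment and a '+', then '\n'.
theorem pv_A_norm (w t n : Int) :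
    PrintPlayerListHeaderOrFooter w t n =
    String.ofList ('+' :: (PySem.List.pyRange 0 n 1).flatMap
      (fun i => List.replicate w.toNat (if i == t then '=' else '-') ++ ['+']) ++ ['\n']) := by
  unfold PrintPlayerListHeaderOrFooter
  have hin : ∀ (r : List Char) (c : Char),
      (PySem.List.pyRange 0 w 1).foldl (fun r _ => r ++ [c]) r = r ++ List.replicate w.toNat c := by
    intro r c
    rw [PySem.List.foldl_append_singleton_eq_map (f := fun _ => c), List.map_const',
      PySem.List.length_pyRange_one]
    simp
  simp only [hin]
  rw [show (fun (r : List Char) (i : Int) =>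
        r ++ List.replicate w.toNat (if i == t then '=' else '-') ++ ['+'])
      = fun (r : List Char) (i : Int) =>
        r ++ (List.replicate w.toNat (if i == t then '=' else '-') ++ ['+']) from by
    funext r i; simp [List.append_assoc]]
  rw [PySem.List.foldl_append_eq_flatMap]
  simp

theorem pv_flat_len (k : Nat) (l : List Char) :
    ((List.replicate k l).flatten).length = k * l.length := by
  induction k with
  | zero => simp
  | succ k ih => simp [List.replicate_succ, ih, Nat.succ_mul]; omega

theorem PrintPlayerListHeaderOrFooter_spec' (w t n : Int) :
    PrintPlayerListHeaderOrFooter w t n = PrintPlayerListHeaderOrFooter_alt w t n := by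
  have hmax : max w 0 = ((w.toNat : Nat) : Int) := by
    rcases le_total w 0 with h | h
    · simp [max_eq_right h, Int.toNat_of_nonpos h]
    · simp [max_eq_left h, Int.toNat_of_nonneg h]
  set W : Nat := w.toNat with hW
  set N : Nat := n.toNat with hN
  set seg : List Char := List.replicate W '-' ++ ['+'] with hseg
  have hsegl : seg.length = W + 1 := by simp [hseg]
  rw [pv_A_norm]
  unfold PrintPlayerListHeaderOrFooter_alt
  by_cases hn : n ≤ 0
  · rw [if_pos hn, PySem.List.pyRange_one_eq_nil hn]
    simp
  rw [if_neg hn]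
  simp only [hmax]
  rw [show PySem.List.pyRepeat ['-'] ((W : Nat) : Int) = List.replicate W '-' by
    rw [PySem.List.pyRepeat_singleton]; simp]
  rw [show PySem.List.pyRepeat ['='] ((W : Nat) : Int) = List.replicate W '=' by
    rw [PySem.List.pyRepeat_singleton]; simp]
  rw [show PySem.List.pyRepeat seg n = (List.replicate N seg).flatten from rfl]
  by_cases hg : 0 ≤ t ∧ t < n
  · -- highlighted segment in range: A's loop writes '=' exactly once, B splices it in
    have ht0 : 0 ≤ t := hg.1
    have htn : t < n := hg.2
    set T : Nat := t.toNat with hT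
    set K : Nat := (n - (t + 1)).toNat with hK
    have hNK : N = T + (1 + K) := by omega
    have hflat : (List.replicate N seg).flatten
        = (List.replicate T seg).flatten ++ (seg ++ (List.replicate K seg).flatten) := by
      rw [hNK, List.replicate_add, List.flatten_append, Nat.add_comm 1 K,
        List.replicate_succ]
      simp
    -- A's side
    rw [PySem.List.pyRange_one_append 0 t n ht0 (le_of_lt htn),
      PySem.List.pyRange_one_cons htn]
    rw [List.flatMap_append, List.flatMap_cons]
    rw [show ((PySem.List.pyRange 0 t 1).flatMap
          (fun i => List.replicate W (if i == t then '=' else '-') ++ ['+']))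
        = (List.replicate T seg).flatten from by
      rw [List.flatMap_def]
      have : ∀ i ∈ PySem.List.pyRange 0 t 1,
          (List.replicate W (if i == t then '=' else '-') ++ ['+']) = seg := by
        intro i hi
        have := (PySem.List.mem_pyRange_one).1 hi
        have : (i == t) = false := by simp; omega
        simp [this, hseg]
      rw [List.map_congr_left this, List.map_const', PySem.List.length_pyRange_one]
      simp [hT]]
    rw [show ((PySem.List.pyRange (t+1) n 1).flatMap
          (fun i => List.replicate W (if i == t then '=' else '-') ++ ['+']))
        = (List.replicate K seg).flatten from by
      rw [List.flatMap_def]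
      have : ∀ i ∈ PySem.List.pyRange (t+1) n 1,
          (List.replicate W (if i == t then '=' else '-') ++ ['+']) = seg := by
        intro i hi
        have := (PySem.List.mem_pyRange_one).1 hi
        have : (i == t) = false := by simp; omega
        simp [this, hseg]
      rw [List.map_congr_left this, List.map_const', PySem.List.length_pyRange_one, hK]]
    -- B's side
    rw [if_pos hg]
    have htT : t = ((T : Nat) : Int) := by omega
    have hstart : (1 : Int) + t * (((W : Nat) : Int) + 1) = ((1 + T * (W + 1) : Nat) : Int) := by
      rw [htT]; push_cast; ring
    have hstartW : (1 : Int) + t * (((W : Nat) : Int) + 1) + ((W : Nat) : Int)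
        = ((1 + T * (W + 1) + W : Nat) : Int) := by
      rw [htT]; push_cast; ring
    rw [hstart, PySem.List.slice_to_natCast]
    rw [show ((1 + T * (W + 1) : Nat) : Int) + ((W : Nat) : Int)
        = ((1 + T * (W + 1) + W : Nat) : Int) by push_cast; ring]
    rw [PySem.List.slice_from_natCast]
    have hlenT : ((List.replicate T seg).flatten).length = T * (W + 1) := by
      rw [pv_flat_len, hsegl]
    rw [hflat]
    rw [show List.take (1 + T * (W + 1))
          ('+' :: ((List.replicate T seg).flatten ++ (seg ++ (List.replicate K seg).flatten)))
        = '+' :: (List.replicate T seg).flatten from by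
      rw [Nat.add_comm 1 (T * (W + 1)), List.take_succ_cons, List.take_left' hlenT]]
    rw [show List.drop (1 + T * (W + 1) + W)
          ('+' :: ((List.replicate T seg).flatten ++ (seg ++ (List.replicate K seg).flatten)))
        = '+' :: (List.replicate K seg).flatten from by
      rw [show 1 + T * (W + 1) + W = (T * (W + 1) + W) + 1 by omega, List.drop_succ_cons]
      rw [show (List.replicate T seg).flatten ++ (seg ++ (List.replicate K seg).flatten)
          = ((List.replicate T seg).flatten ++ List.replicate W '-')
            ++ ('+' :: (List.replicate K seg).flatten) from by
        simp [hseg]]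
      rw [List.drop_left' (by simp [hlenT])]]
    congr 1
    simp [hW]
  · -- highlight out of range: no '=' is ever written, B keeps the uniform border
    rw [if_neg hg]
    rw [show ((PySem.List.pyRange 0 n 1).flatMap
          (fun i => List.replicate W (if i == t then '=' else '-') ++ ['+']))
        = (List.replicate N seg).flatten from by
      rw [List.flatMap_def]
      have : ∀ i ∈ PySem.List.pyRange 0 n 1,
          (List.replicate W (if i == t then '=' else '-') ++ ['+']) = seg := by
        intro i hi
        have := (PySem.List.mem_pyRange_one).1 hi
        have : (i == t) = false := by simp; omega
        simp [this, hseg]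
      rw [List.map_congr_left this, List.map_const', PySem.List.length_pyRange_one]
      simp [hN]]

-- ===== VERDICT (by name: the statement is the Claim_ definition above) =====
theorem PrintPlayerListHeaderOrFooter_spec : Claim_equal_PrintPlayerListHeaderOrFooter := by
  intro w t n _
  exact PrintPlayerListHeaderOrFooter_spec' w t n
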